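-- pv_equiv track=rewrite | github.com/santoshr1016/WeekendMasala | itsybitsy/TH/smallest_missing.py | smallest_missing
-- ===== SOURCE A (Python) =====
-- def smallest_missing(arr):
--     sl = sorted(list(set(arr)))
--     sl_set = set(sl)
--     for item in sl:
--         if item + 1 not in sl_set:
--             if item <= 0:
--                 return 1
--             else:
--                 return item + 1
-- ===== SOURCE B (Python) =====
-- def smallest_missing(arr):
--     # One pass over a hash set: answer is the minimum x with x+1 absent (no sort).
--     s = set(arr)
--     if not s:
--         return None
--     m = min(x for x in s if x + 1 not in s)
--     return 1 if m <= 0 else m + 1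
-- ===== Notes on version B (the rewrite author's own statement) =====
-- stated objective: alternative
-- what changed: Replaces sort-then-scan-for-first-gap with a single sort-free pass over a hash set taking the minimum element whose successor is absent; measured speedups hover around the 1.5x bar, so no speed claim is made.
import Mathlib
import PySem

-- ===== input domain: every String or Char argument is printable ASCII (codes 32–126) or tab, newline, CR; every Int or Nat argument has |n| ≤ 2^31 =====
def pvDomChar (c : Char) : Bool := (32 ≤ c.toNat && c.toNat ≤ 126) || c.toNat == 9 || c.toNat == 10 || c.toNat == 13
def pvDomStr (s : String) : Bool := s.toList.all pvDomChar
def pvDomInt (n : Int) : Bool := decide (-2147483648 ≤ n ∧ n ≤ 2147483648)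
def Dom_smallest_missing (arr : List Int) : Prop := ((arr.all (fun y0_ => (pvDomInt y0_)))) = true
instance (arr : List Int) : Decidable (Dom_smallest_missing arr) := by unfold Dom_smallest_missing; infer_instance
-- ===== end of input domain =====

-- B replaces A's sort-then-scan-for-first-gap by a single sort-free pass over the set
-- taking the minimum element whose successor is absent (objective: alternative algorithm).

-- ===== PORT A =====
-- the 'for item in sl: …' loop of A (early return as Option)
def smallestMissingLoopA (slSet : PySem.Set Int) : List Int → Option Int
  | [] => none
  | item :: rest =>
      if !(PySem.Set.contains slSet (item + 1)) then
        (if item ≤ 0 then some 1 else some (item + 1))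
      else smallestMissingLoopA slSet rest

def smallest_missing (arr : List Int) : Option Int :=
  let sl := PySem.List.sorted (PySem.Set.ofList arr) (fun x => x) false
  let slSet := PySem.Set.ofList sl
  smallestMissingLoopA slSet sl

-- ===== PORT B =====
def smallest_missing_alt (arr : List Int) : Option Int :=
  let s := PySem.Set.ofList arr
  if s = [] then none
  else
    match PySem.List.min? (List.filter (fun x => !(PySem.Set.contains s (x + 1))) s) (fun x => x) with
    | none => none   -- unreachable: the maximum of a nonempty set has no successor in it
    | some m => some (if m ≤ 0 then 1 else m + 1)

-- ===== PRECONDITION & SPEC =====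
def Spec_smallest_missing (arr : List Int) (out : Option Int) : Prop := out = smallest_missing_alt arr
instance (arr : List Int) (out : Option Int) : Decidable (Spec_smallest_missing arr out) := by unfold Spec_smallest_missing; infer_instance

-- ===== CLAIM (what is proved, stated in full; the proofs are below) =====
def Claim_equal_smallest_missing : Prop := ∀ (arr : List Int), Dom_smallest_missing arr → Spec_smallest_missing arr (smallest_missing arr)

-- ===== LEMMAS AND PROOFS =====

theorem smallestMissingLoopA_eq_find (slSet : PySem.Set Int) (l : List Int) :
    smallestMissingLoopA slSet l =
      (l.find? (fun x => !(PySem.Set.contains slSet (x + 1)))).map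
        (fun item => if item ≤ 0 then 1 else item + 1) := by
  induction l with
  | nil => rfl
  | cons x t ih =>
      simp only [smallestMissingLoopA, List.find?]
      by_cases h : x + 1 ∈ slSet
      · simp [PySem.Set.contains, h, ih]
      · simp [PySem.Set.contains, h]; split_ifs <;> rfl

theorem contains_ofList_sorted (arr : List Int) (y : Int) :
    PySem.Set.contains (PySem.Set.ofList (PySem.List.sorted (PySem.Set.ofList arr) (fun x => x) false)) y
      = PySem.Set.contains (PySem.Set.ofList arr) y := by
  simp [PySem.Set.contains, PySem.Set.mem_ofList, PySem.List.mem_sorted]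

theorem find?_sorted_eq_min? (l l' : List Int) (p : Int → Bool)
    (hl : l.Pairwise (· < ·)) (hperm : l'.Perm l) :
    l.find? p = PySem.List.min? (l'.filter p) (fun x => x) := by
  cases hf : l.find? p with
  | none =>
      have hnone : ∀ x ∈ l, p x = false := by
        intro x hx
        simpa using List.find?_eq_none.mp hf x hx
      have : l'.filter p = [] := by
        apply List.filter_eq_nil_iff.mpr
        intro x hx
        simp [hnone x (hperm.mem_iff.mp hx)]
      rw [this]; rfl
  | some h =>
      obtain ⟨hp, as, bs, hdec, hpre⟩ := List.find?_eq_some_iff_append.mp hf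
      have hhl : h ∈ l := by rw [hdec]; simp
      have hhf : h ∈ l'.filter p := List.mem_filter.mpr ⟨hperm.mem_iff.mpr hhl, hp⟩
      -- h is minimal among elements of l satisfying p
      have hmin : ∀ y ∈ l, p y = true → h ≤ y := by
        intro y hy hpy
        rw [hdec] at hy hl
        rcases List.mem_append.mp hy with hya | hyb
        · exact absurd hpy (by simpa using hpre y hya)
        · rcases List.mem_cons.mp hyb with rfl | hyb'
          · exact le_refl _
          · exact le_of_lt (List.rel_of_pairwise_cons ((List.pairwise_append.mp hl).2.1) hyb')
      cases hm : PySem.List.min? (l'.filter p) (fun x => x) with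
      | none =>
          rw [PySem.List.min?_eq_none_iff] at hm
          rw [hm] at hhf
          simp at hhf
      | some m =>
          have hmf := PySem.List.min?_mem hm
          have hml : m ∈ l := hperm.mem_iff.mp (List.mem_filter.mp hmf).1
          have hpm : p m = true := (List.mem_filter.mp hmf).2
          have h1 : h ≤ m := hmin m hml hpm
          have h2 : m ≤ h := PySem.List.min?_isMin hm h hhf
          exact congrArg some (le_antisymm h1 h2)

-- ===== VERDICT (by name: the statement is the Claim_ definition above) =====
theorem smallest_missing_spec : Claim_equal_smallest_missing := by
  intro arr _
  unfold Spec_smallest_missing smallest_missing smallest_missing_alt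
  simp only []
  set S := PySem.Set.ofList arr with hSdef
  set sl := PySem.List.sorted S (fun x => x) false with hsl
  rw [smallestMissingLoopA_eq_find]
  have hpred : (fun x => !(PySem.Set.contains (PySem.Set.ofList sl) (x + 1)))
      = (fun x => !(PySem.Set.contains S (x + 1))) := by
    funext x; rw [hsl, hSdef, contains_ofList_sorted]
  rw [hpred]
  have hfind := find?_sorted_eq_min? sl S (fun x => !(PySem.Set.contains S (x + 1)))
      (PySem.List.sorted_ofList_pairwise_lt arr) (PySem.List.sorted_perm _ _ _).symm
  rw [hfind]
  by_cases hS : S = []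
  · simp [hS, PySem.List.min?]
  · rw [if_neg hS]
    -- the filtered set is nonempty: the maximum element's successor is absent
    cases hmax : PySem.List.max? S (fun x => x) with
    | none => rw [PySem.List.max?_eq_none_iff] at hmax; exact absurd hmax hS
    | some M =>
        have hMm : M ∈ S := PySem.List.max?_mem hmax
        have hpM : (!(PySem.Set.contains S (M + 1))) = true := by
          simp only [Bool.not_eq_true']
          by_cases hmem : (M + 1) ∈ S
          · exfalso
            have := PySem.List.max?_isMax hmax (M + 1) hmem
            omega
          · simp [PySem.Set.contains, hmem]
        have hne : S.filter (fun x => !(PySem.Set.contains S (x + 1))) ≠ [] := by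
          intro hnil
          have hMin : M ∈ S.filter (fun x => !(PySem.Set.contains S (x + 1))) :=
            List.mem_filter.mpr ⟨hMm, hpM⟩
          rw [hnil] at hMin
          simp at hMin
        cases hm : PySem.List.min? (S.filter (fun x => !(PySem.Set.contains S (x + 1)))) (fun x => x) with
        | none => rw [PySem.List.min?_eq_none_iff] at hm; exact absurd hm hne
        | some m => rfl
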